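-- pv_equiv track=rewrite | github.com/KooshaPari/Tracera | .archive/phenoSDK-wtrees-orphan-2026-04-26/docs-deprecation-20260426/scripts/archive/final_cleanup/final_duplicate_consolidation.py | _determine_keep_location
-- ===== SOURCE A (Python) =====
-- def _determine_keep_location(
--     class_name: str, locations: list[str],
-- ) -> str | None:
--     """Determine which location to keep for a class."""
--     # Priority order for keeping classes
--     priority_patterns = [
--         "core/",
--         "ports/",
--         "adapters/",
--         "exceptions/",
--         "database/",
--         "cli/",
--         "testing/",
--         "infrastructure/",
--         "mcp/",
--         "workflow/",
--         "observability/",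
--         "auth/",
--         "storage/",
--         "kits/",
--     ]
--
--     for pattern in priority_patterns:
--         for location in locations:
--             if pattern in location:
--                 return location
--
--     # If no priority pattern matches, keep the first one
--     return locations[0] if locations else None
-- ===== SOURCE B (Python) =====
-- def _determine_keep_location(
--     class_name: str, locations: list[str],
-- ) -> str | None:
--     """Determine which location to keep for a class."""
--     priority_patterns = [
--         "core/",
--         "ports/",
--         "adapters/",
--         "exceptions/",
--         "database/",
--         "cli/",
--         "testing/",
--         "infrastructure/",
--         "mcp/",
--         "workflow/",
--         "observability/",
--         "auth/",
--         "storage/",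
--         "kits/",
--     ]
--
--     def score(location):
--         # rank of the best (lowest-index) priority pattern occurring in it
--         return min(
--             (i for i, p in enumerate(priority_patterns) if p in location),
--             default=len(priority_patterns),
--         )
--
--     # stable min: first location in original order among equal scores
--     return min(locations, key=score, default=None)
-- ===== Notes on version B (the rewrite author's own statement) =====
-- stated objective: simpler
-- what changed: Replaces the priority-first nested early-return double scan with a per-location score (lowest matching pattern index, defaulting to len(priority_patterns)) and a single stable min over the locations.
import Mathlib
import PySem

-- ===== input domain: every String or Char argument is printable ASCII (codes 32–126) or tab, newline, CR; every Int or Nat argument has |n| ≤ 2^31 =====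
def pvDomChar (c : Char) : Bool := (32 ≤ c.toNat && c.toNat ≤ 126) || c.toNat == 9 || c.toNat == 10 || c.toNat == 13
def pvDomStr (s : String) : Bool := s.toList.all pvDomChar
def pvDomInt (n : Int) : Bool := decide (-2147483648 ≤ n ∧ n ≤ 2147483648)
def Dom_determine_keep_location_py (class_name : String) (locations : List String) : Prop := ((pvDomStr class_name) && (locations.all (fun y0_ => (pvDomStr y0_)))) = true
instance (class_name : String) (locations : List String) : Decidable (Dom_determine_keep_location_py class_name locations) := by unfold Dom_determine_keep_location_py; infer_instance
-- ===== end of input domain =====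

-- B replaces A's priority-first nested early-return scan by a per-location score
-- (lowest matching pattern index, default len(patterns)) and one stable min (objective: simpler).

-- the priority pattern list both Pythons write out literally
def dklPriorityPatterns : List String :=
  ["core/", "ports/", "adapters/", "exceptions/", "database/", "cli/", "testing/",
   "infrastructure/", "mcp/", "workflow/", "observability/", "auth/", "storage/", "kits/"]

-- ===== PORT A =====
-- inner loop: first location containing `pattern`, else none
def dklFindLoc (pattern : String) : List String → Option String
  | [] => none
  | location :: rest =>
    if PySem.Str.isIn pattern location then some location else dklFindLoc pattern rest

-- outer loop over the priority patterns
def dklScan (locations : List String) : List String → Option String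
  | [] => none
  | pattern :: rest =>
    match dklFindLoc pattern locations with
    | some l => some l
    | none => dklScan locations rest

def determine_keep_location_py (class_name : String) (locations : List String) : Option String :=
  match dklScan locations dklPriorityPatterns with
  | some l => some l
  | none => match locations with   -- locations[0] if locations else None
    | [] => none
    | loc :: _ => some loc

-- ===== PORT B =====
-- score(location) = min((i for i, p in enumerate(priority_patterns) if p in location),
--                       default=len(priority_patterns))
def dklScore (priority_patterns : List String) (location : String) : Int :=
  match PySem.List.min?
      (((PySem.List.enumerate priority_patterns).filter
          (fun ip => PySem.Str.isIn ip.2 location)).map (fun ip => ip.1))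
      (fun i => i) with
  | some m => m
  | none => (priority_patterns.length : Int)

-- min(locations, key=score, default=None): stable min, first location among ties
def determine_keep_location_py_alt (class_name : String) (locations : List String) : Option String :=
  PySem.List.min? locations (dklScore dklPriorityPatterns)

-- ===== PRECONDITION & SPEC =====
def Spec_determine_keep_location_py (class_name : String) (locations : List String) (out : Option String) : Prop := out = determine_keep_location_py_alt class_name locations
instance (class_name : String) (locations : List String) (out : Option String) : Decidable (Spec_determine_keep_location_py class_name locations out) := by unfold Spec_determine_keep_location_py; infer_instance

-- ===== CLAIM (what is proved, stated in full; the proofs are below) =====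
def Claim_equal_determine_keep_location_py : Prop := ∀ (class_name : String) (locations : List String), Dom_determine_keep_location_py class_name locations → Spec_determine_keep_location_py class_name locations (determine_keep_location_py class_name locations)

-- ===== LEMMAS AND PROOFS =====

-- reference score: index of the first pattern contained in l (= length if none matches)
def dklSc : List String → String → Int
  | [], _ => 0
  | p :: t, l => if PySem.Str.isIn p l then 0 else dklSc t l + 1

-- keep x unless the candidate r is strictly smaller (Python's stable-min merge step)
def pvMerge {α : Type} (key : α → Int) (x : α) : Option α → α
  | none => x
  | some m => if key m < key x then m else x

-- reference stable argmin (first element with minimal key), by recursion on the list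
def pvArgmin {α : Type} (key : α → Int) : List α → Option α
  | [] => none
  | x :: t => some (pvMerge key x (pvArgmin key t))

-- default-eliminator for an optional minimum (shape of B's `min(..., default=...)`)
def pvMatchD (d : Int) : Option Int → Int
  | none => d
  | some m => m

lemma pvArgmin_mem {α : Type} {key : α → Int} {xs : List α} :
    ∀ {m : α}, pvArgmin key xs = some m → m ∈ xs := by
  induction xs with
  | nil => intro m h; simp [pvArgmin] at h
  | cons x t ih =>
    intro m h
    rw [pvArgmin] at h
    injection h with h
    cases h' : pvArgmin key t with
    | none => rw [h', pvMerge] at h; subst h; exact List.mem_cons_self ..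
    | some m' =>
      rw [h', pvMerge] at h
      split_ifs at h
      · subst h; exact List.mem_cons_of_mem _ (ih h')
      · subst h; exact List.mem_cons_self ..

lemma dklSc_nonneg (pats : List String) (l : String) : 0 ≤ dklSc pats l := by
  induction pats with
  | nil => simp [dklSc]
  | cons p t ih => rw [dklSc]; split_ifs <;> omega

lemma min?_acc {α : Type} (key : α → Int) :
    ∀ (t : List α) (m : α),
      PySem.List.min? (m :: t) key = some (pvMerge key m (pvArgmin key t)) := by
  intro t
  induction t with
  | nil => intro m; rfl
  | cons x t' ih =>
    intro m
    have hstep : PySem.List.min? (m :: x :: t') key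
        = PySem.List.min? ((if key x < key m then x else m) :: t') key := by
      by_cases h : key x < key m
      · rw [if_pos h]
        unfold PySem.List.min?
        simp only [List.foldl_cons]
        congr 1
        show (if key x < key m then some x else some m) = some x
        rw [if_pos h]
      · rw [if_neg h]
        unfold PySem.List.min?
        simp only [List.foldl_cons]
        congr 1
        show (if key x < key m then some x else some m) = some m
        rw [if_neg h]
    rw [hstep, ih, pvArgmin, pvMerge]
    cases pvArgmin key t' with
    | none => simp only [pvMerge]
    | some m' => simp only [pvMerge]; split_ifs <;> first | rfl | omega

lemma min?_eq_argmin {α : Type} (key : α → Int) (xs : List α) :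
    PySem.List.min? xs key = pvArgmin key xs := by
  cases xs with
  | nil => rfl
  | cons x t => rw [min?_acc key t x, pvArgmin]

lemma pvArgmin_congr_add_one {α : Type} {key1 key2 : α → Int} (xs : List α)
    (h : ∀ a ∈ xs, key1 a = key2 a + 1) : pvArgmin key1 xs = pvArgmin key2 xs := by
  induction xs with
  | nil => rfl
  | cons x t ih =>
    have ht : pvArgmin key1 t = pvArgmin key2 t :=
      ih (fun a ha => h a (List.mem_cons_of_mem _ ha))
    rw [pvArgmin, pvArgmin, ht]
    cases h' : pvArgmin key2 t with
    | none => simp only [pvMerge]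
    | some m =>
      have hm : m ∈ t := pvArgmin_mem h'
      have h1 := h x (List.mem_cons_self ..)
      have h2 := h m (List.mem_cons_of_mem _ hm)
      simp only [pvMerge]
      split_ifs <;> first | rfl | omega

lemma pvArgmin_const {α : Type} {key : α → Int} {c : Int} (xs : List α)
    (h : ∀ a ∈ xs, key a = c) : pvArgmin key xs = xs.head? := by
  cases xs with
  | nil => rfl
  | cons x t =>
    rw [pvArgmin]
    cases h' : pvArgmin key t with
    | none => simp only [pvMerge, List.head?_cons]
    | some m =>
      have hm : m ∈ t := pvArgmin_mem h'
      simp only [pvMerge, List.head?_cons]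
      rw [if_neg (by
        rw [h m (List.mem_cons_of_mem _ hm), h x (List.mem_cons_self ..)]; omega)]

lemma pvArgmin_split {α : Type} {key : α → Int} {l : α} :
    ∀ (pre : List α) {xs suf : List α}, xs = pre ++ l :: suf →
      (∀ e ∈ pre, key l < key e) → (∀ e ∈ suf, key l ≤ key e) →
      pvArgmin key xs = some l := by
  intro pre
  induction pre with
  | nil =>
    intro xs suf h h1 h2
    subst h
    simp only [List.nil_append]
    rw [pvArgmin]
    cases h' : pvArgmin key suf with
    | none => simp only [pvMerge]
    | some m =>
      have hm : m ∈ suf := pvArgmin_mem h'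
      simp only [pvMerge]
      rw [if_neg (by have := h2 m hm; omega)]
  | cons e pre' ihp =>
    intro xs suf h h1 h2
    subst h
    simp only [List.cons_append]
    rw [pvArgmin, ihp rfl (fun x hx => h1 x (List.mem_cons_of_mem _ hx)) h2,
      pvMerge, if_pos (h1 e (List.mem_cons_self ..))]

lemma dklL_lb (pats : List String) (s : Int) (l : String) :
    ∀ i ∈ ((PySem.List.enumerate pats s).filter
        (fun ip => PySem.Str.isIn ip.2 l)).map (fun ip => ip.1), s ≤ i := by
  intro i hi
  simp only [List.mem_map, List.mem_filter, PySem.List.mem_enumerate_iff] at hi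
  obtain ⟨ip, ⟨⟨k, hk, hip⟩, -⟩, rfl⟩ := hi
  rw [hip]
  simp

lemma dklArgminL (l : String) :
    ∀ (pats : List String) (s : Int),
      pvMatchD (s + (pats.length : Int))
        (pvArgmin (fun i => i)
          (((PySem.List.enumerate pats s).filter
              (fun ip => PySem.Str.isIn ip.2 l)).map (fun ip => ip.1)))
        = s + dklSc pats l := by
  intro pats
  induction pats with
  | nil => intro s; simp [PySem.List.enumerate_nil, pvArgmin, pvMatchD, dklSc]
  | cons p t ih =>
    intro s
    rw [PySem.List.enumerate_cons]
    by_cases hp : PySem.Str.isIn p l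
    · have hpc : PySem.Chars.isIn p.toList l.toList = true := by simpa using hp
      have hfil : ((s, p) :: PySem.List.enumerate t (s + 1)).filter
            (fun ip => PySem.Str.isIn ip.2 l)
          = (s, p) :: (PySem.List.enumerate t (s + 1)).filter
            (fun ip => PySem.Str.isIn ip.2 l) := by
        simp [hpc]
      rw [hfil, List.map_cons, pvArgmin, dklSc, if_pos hp]
      cases hR : pvArgmin (fun i : Int => i)
          (((PySem.List.enumerate t (s + 1)).filter
              (fun ip => PySem.Str.isIn ip.2 l)).map (fun ip => ip.1)) with
      | none => simp [pvMerge, pvMatchD]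
      | some m =>
        have hm := pvArgmin_mem hR
        have hlb := dklL_lb t (s + 1) l m hm
        simp only [pvMerge, pvMatchD]
        rw [if_neg (by omega)]
        omega
    · have hpc : PySem.Chars.isIn p.toList l.toList = false := by simpa using hp
      have hfil : ((s, p) :: PySem.List.enumerate t (s + 1)).filter
            (fun ip => PySem.Str.isIn ip.2 l)
          = (PySem.List.enumerate t (s + 1)).filter
            (fun ip => PySem.Str.isIn ip.2 l) := by
        simp [hpc]
      rw [hfil, dklSc, if_neg hp]
      cases hR : pvArgmin (fun i : Int => i)
          (((PySem.List.enumerate t (s + 1)).filter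
              (fun ip => PySem.Str.isIn ip.2 l)).map (fun ip => ip.1)) with
      | none =>
        have h2 := ih (s + 1)
        rw [hR, pvMatchD] at h2
        rw [pvMatchD]
        simp only [List.length_cons]
        push_cast
        omega
      | some m =>
        have h2 := ih (s + 1)
        rw [hR, pvMatchD] at h2
        rw [pvMatchD]
        omega

lemma dklScore_eq (pats : List String) (l : String) :
    dklScore pats l = dklSc pats l := by
  unfold dklScore
  rw [min?_eq_argmin]
  have h := dklArgminL l pats 0
  simp only [zero_add] at h
  cases hR : pvArgmin (fun i : Int => i)
      (((PySem.List.enumerate pats 0).filter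
          (fun ip => PySem.Str.isIn ip.2 l)).map (fun ip => ip.1)) with
  | none => rw [hR, pvMatchD] at h; exact h
  | some m => rw [hR, pvMatchD] at h; exact h

lemma dklFindLoc_none {p : String} {locs : List String}
    (h : dklFindLoc p locs = none) : ∀ m ∈ locs, PySem.Str.isIn p m = false := by
  induction locs with
  | nil => simp
  | cons x t ih =>
    rw [dklFindLoc] at h
    split_ifs at h with hx
    intro m hm
    rcases List.mem_cons.mp hm with rfl | hm
    · simp only [Bool.not_eq_true] at hx; exact hx
    · exact ih h m hm

lemma dklFindLoc_some {p : String} {locs : List String} {l : String}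
    (h : dklFindLoc p locs = some l) :
    ∃ pre suf, locs = pre ++ l :: suf ∧ PySem.Str.isIn p l = true ∧
      ∀ e ∈ pre, PySem.Str.isIn p e = false := by
  induction locs with
  | nil => simp [dklFindLoc] at h
  | cons x t ih =>
    rw [dklFindLoc] at h
    split_ifs at h with hx
    · injection h with h
      subst h
      exact ⟨[], t, rfl, hx, by simp⟩
    · obtain ⟨pre, suf, hsplit, hl, hpre⟩ := ih h
      refine ⟨x :: pre, suf, by rw [hsplit]; rfl, hl, ?_⟩
      intro e he
      rcases List.mem_cons.mp he with rfl | he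
      · simp only [Bool.not_eq_true] at hx; exact hx
      · exact hpre e he

lemma dklScanEq : ∀ (pats locs : List String),
    (match dklScan locs pats with
     | some l => some l
     | none => match locs with
       | [] => none
       | loc :: _ => some loc)
      = pvArgmin (dklSc pats) locs := by
  intro pats
  induction pats with
  | nil =>
    intro locs
    rw [pvArgmin_const (key := dklSc []) (c := 0) locs (fun a _ => rfl)]
    cases locs <;> rfl
  | cons p t ih =>
    intro locs
    cases hf : dklFindLoc p locs with
    | some l =>
      rw [show dklScan locs (p :: t) = some l from by rw [dklScan, hf]]
      obtain ⟨pre, suf, hsplit, hl, hpre⟩ := dklFindLoc_some hf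
      refine (pvArgmin_split pre hsplit ?_ ?_).symm
      · intro e he
        have h1 : dklSc (p :: t) l = 0 := by rw [dklSc, if_pos hl]
        have h2 : dklSc (p :: t) e = dklSc t e + 1 := by
          rw [dklSc, if_neg (by rw [hpre e he]; decide)]
        have := dklSc_nonneg t e
        omega
      · intro e _
        have h1 : dklSc (p :: t) l = 0 := by rw [dklSc, if_pos hl]
        have := dklSc_nonneg (p :: t) e
        omega
    | none =>
      have hall := dklFindLoc_none hf
      rw [show dklScan locs (p :: t) = dklScan locs t from by rw [dklScan, hf]]
      rw [ih locs]
      exact (pvArgmin_congr_add_one locs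
        (fun a ha => by rw [dklSc, if_neg (by rw [hall a ha]; decide)])).symm

-- ===== VERDICT (by name: the statement is the Claim_ definition above) =====
theorem determine_keep_location_py_spec : Claim_equal_determine_keep_location_py := by
  intro class_name locations _
  unfold Spec_determine_keep_location_py determine_keep_location_py
    determine_keep_location_py_alt
  rw [min?_eq_argmin]
  rw [show dklScore dklPriorityPatterns = dklSc dklPriorityPatterns from
    funext (dklScore_eq _)]
  exact dklScanEq dklPriorityPatterns locations
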